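-- pv_equiv track=rewrite | github.com/yanguahe/amdgcn_edit | amdgcn_passes.py | find_aligned_free_registers
-- ===== SOURCE A (Python) =====
-- from typing import Dict, List, Set, Optional, Tuple, Any, Union
--
-- def find_aligned_free_registers(
--     fgpr_set: Set[str],
--     prefix: str,
--     count: int,
--     alignment: int
-- ) -> Optional[int]:
--     """
--     Find the smallest aligned starting index from free registers.
--
--     Args:
--         fgpr_set: Set of free register names (e.g., {'v91', 'v92', 'v93', ...})
--         prefix: Register prefix ('v', 'a', or 's')
--         count: Number of consecutive registers needed
--         alignment: Starting index must be divisible by this value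
--
--     Returns:
--         Starting index if found, None otherwise
--     """
--     # Extract indices from the free set that match the prefix
--     free_indices = sorted([
--         int(r[1:]) for r in fgpr_set
--         if r.startswith(prefix) and r[1:].isdigit()
--     ])
--
--     if len(free_indices) < count:
--         return None
--
--     # Find the smallest aligned starting index with 'count' consecutive registers
--     for start_idx in free_indices:
--         # Check alignment
--         if alignment > 1 and start_idx % alignment != 0:
--             continue
--
--         # Check if we have 'count' consecutive registers starting from start_idx
--         consecutive = True
--         for i in range(count):
--             if (start_idx + i) not in free_indices:
--                 consecutive = False
--                 break
--
--         if consecutive: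
--             return start_idx
--
--     return None
-- ===== SOURCE B (Python) =====
-- def find_aligned_free_registers(fgpr_set, prefix, count, alignment):
--     idxs = sorted({int(r[1:]) for r in fgpr_set
--                    if r.startswith(prefix) and r[1:].isdigit()})
--     i, n = 0, len(idxs)
--     while i < n:
--         # maximal run of consecutive indices idxs[i..j]
--         a = idxs[i]
--         j = i
--         while j + 1 < n and idxs[j + 1] == idxs[j] + 1:
--             j += 1
--         b = idxs[j]
--         # smallest aligned candidate in the run
--         t = a if alignment <= 1 else -(-a // alignment) * alignment
--         if t <= b and t + count - 1 <= b:
--             return t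
--         i = j + 1
--     return None
-- ===== Notes on version B (the rewrite author's own statement) =====
-- stated objective: alternative
-- what changed: Replaces the per-candidate inner membership scan (for every free index, test count consecutive memberships by linear list search) with a single left-to-right decomposition of the sorted distinct indices into maximal consecutive runs, computing each run's unique viable aligned start by closed-form ceiling division.
import Mathlib
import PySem

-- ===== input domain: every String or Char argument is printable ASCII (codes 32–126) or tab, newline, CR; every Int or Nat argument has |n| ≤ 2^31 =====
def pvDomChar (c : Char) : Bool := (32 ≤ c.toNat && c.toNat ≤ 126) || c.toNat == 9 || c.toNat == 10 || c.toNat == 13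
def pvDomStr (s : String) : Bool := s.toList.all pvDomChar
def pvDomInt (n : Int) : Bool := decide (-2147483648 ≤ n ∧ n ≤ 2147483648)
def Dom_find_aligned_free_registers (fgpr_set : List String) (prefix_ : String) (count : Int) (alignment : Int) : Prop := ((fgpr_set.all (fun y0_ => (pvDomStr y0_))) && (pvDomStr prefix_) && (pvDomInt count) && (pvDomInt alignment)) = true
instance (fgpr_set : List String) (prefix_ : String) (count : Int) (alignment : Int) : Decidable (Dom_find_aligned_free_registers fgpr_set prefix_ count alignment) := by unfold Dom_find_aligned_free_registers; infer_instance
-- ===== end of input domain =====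

-- B replaces A's per-candidate linear rescans with one pass over the maximal consecutive
-- runs of the sorted distinct indices, computing each run's unique viable aligned start by
-- closed-form ceiling division (objective: alternative algorithm; no mutation involved).

-- ===== PORT A =====
-- int(r[1:]) for r in fgpr_set if r.startswith(prefix) and r[1:].isdigit() ; sorted(...)
def pvA_indices (fgpr_set : List String) (prefix_ : String) : List Int :=
  PySem.List.sorted
    ((fgpr_set.filter (fun r =>
        PySem.Str.startswith r prefix_ &&
        PySem.Str.strIsdigit (PySem.Str.slice r (some 1) none))).map
      (fun r => (PySem.Int.ofStr? (PySem.Str.slice r (some 1) none)).getD 0))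
    (fun x => x) false

-- inner loop: for i in range(count): if (start_idx + i) not in free_indices: break
def pvA_consec (free : List Int) (start count : Int) : Bool :=
  (PySem.List.pyRange 0 count 1).all (fun i => free.contains (start + i))

-- outer loop over free_indices
def pvA_loop (free : List Int) (count alignment : Int) : List Int → Option Int
  | [] => none
  | s :: rest =>
    if decide (1 < alignment) && !(PySem.Int.mod s alignment == 0) then
      pvA_loop free count alignment rest
    else if pvA_consec free s count then some s
    else pvA_loop free count alignment rest

def find_aligned_free_registers (fgpr_set : List String) (prefix_ : String) (count : Int) (alignment : Int) : Option Int :=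
  let free := pvA_indices fgpr_set prefix_
  if (free.length : Int) < count then none
  else pvA_loop free count alignment free

-- ===== PORT B =====
-- same comprehension as A's, then sorted(set(...))
def pvB_indices (fgpr_set : List String) (prefix_ : String) : List Int :=
  PySem.List.sorted
    (PySem.Set.ofList
      ((fgpr_set.filter (fun r =>
          PySem.Str.startswith r prefix_ &&
          PySem.Str.strIsdigit (PySem.Str.slice r (some 1) none))).map
        (fun r => (PySem.Int.ofStr? (PySem.Str.slice r (some 1) none)).getD 0)))
    (fun x => x) false

-- inner while: extend the run while idxs[j+1] == idxs[j] + 1; returns (b, remainder)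
def pvB_extendRun : Int → List Int → Int × List Int
  | a, [] => (a, [])
  | a, x :: r => if x = a + 1 then pvB_extendRun x r else (a, x :: r)

lemma pvB_extendRun_length (a : Int) (l : List Int) : (pvB_extendRun a l).2.length ≤ l.length := by
  induction l generalizing a with
  | nil => simp [pvB_extendRun]
  | cons x r ih =>
    simp only [pvB_extendRun]
    split
    · exact le_trans (ih x) (by simp)
    · simp

-- t = a if alignment <= 1 else -(-a // alignment) * alignment
def pvB_cand (alignment a : Int) : Int :=
  if alignment ≤ 1 then a else -(PySem.Int.floordiv (-a) alignment) * alignment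

-- outer while over the runs
def pvB_loop (count alignment : Int) : List Int → Option Int
  | [] => none
  | a :: rest =>
    let br := pvB_extendRun a rest
    let t := pvB_cand alignment a
    if t ≤ br.1 ∧ t + count - 1 ≤ br.1 then some t
    else pvB_loop count alignment br.2
termination_by l => l.length
decreasing_by
  exact Nat.lt_succ_of_le (pvB_extendRun_length a rest)

def find_aligned_free_registers_alt (fgpr_set : List String) (prefix_ : String) (count : Int) (alignment : Int) : Option Int :=
  pvB_loop count alignment (pvB_indices fgpr_set prefix_)

-- ===== PRECONDITION & SPEC =====
def Spec_find_aligned_free_registers (fgpr_set : List String) (prefix_ : String) (count : Int) (alignment : Int) (out : Option Int) : Prop := out = find_aligned_free_registers_alt fgpr_set prefix_ count alignment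
instance (fgpr_set : List String) (prefix_ : String) (count : Int) (alignment : Int) (out : Option Int) : Decidable (Spec_find_aligned_free_registers fgpr_set prefix_ count alignment out) := by unfold Spec_find_aligned_free_registers; infer_instance

-- ===== CLAIM (what is proved, stated in full; the proofs are below) =====
def Claim_equal_find_aligned_free_registers : Prop := ∀ (fgpr_set : List String) (prefix_ : String) (count : Int) (alignment : Int), Dom_find_aligned_free_registers fgpr_set prefix_ count alignment → Spec_find_aligned_free_registers fgpr_set prefix_ count alignment (find_aligned_free_registers fgpr_set prefix_ count alignment)

-- ===== LEMMAS AND PROOFS =====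

-- the Boolean test A applies to a candidate s
def pvAligned (alignment s : Int) : Bool :=
  !(decide (1 < alignment) && !(PySem.Int.mod s alignment == 0))

def pvOk (free : List Int) (count alignment s : Int) : Bool :=
  pvAligned alignment s && pvA_consec free s count

lemma pvA_loop_eq_find? (free : List Int) (count alignment : Int) (l : List Int) :
    pvA_loop free count alignment l = l.find? (pvOk free count alignment) := by
  induction l with
  | nil => rfl
  | cons s rest ih =>
    simp only [pvA_loop, List.find?, pvOk, pvAligned]
    by_cases h1 : (decide (1 < alignment) && !(PySem.Int.mod s alignment == 0)) = true
    · simp [h1, ih]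
    · simp only [Bool.not_eq_true] at h1
      by_cases h2 : pvA_consec free s count = true
      · simp [h1, h2]
      · simp [h1, h2, ih]

-- a duplicate-free list of members of `l` is no longer than `l`
lemma pvNodup_subset_length {l m : List Int} (hnd : m.Nodup) (hsub : ∀ x ∈ m, x ∈ l) :
    m.length ≤ l.length := by
  classical
  calc m.length = m.toFinset.card := (List.toFinset_card_of_nodup hnd).symm
    _ ≤ l.toFinset.card := Finset.card_le_card (by
        intro x hx
        simp only [List.mem_toFinset] at hx ⊢
        exact hsub x hx)
    _ ≤ l.length := l.toFinset_card_le

-- find? on a (≤)-sorted list returns a minimum among the satisfying members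
lemma pvFind?_min {l : List Int} {q : Int → Bool} (hp : l.Pairwise (· ≤ ·)) {x : Int}
    (h : l.find? q = some x) : ∀ y ∈ l, q y = true → x ≤ y := by
  induction l with
  | nil => simp at h
  | cons a t ih =>
    intro y hy hqy
    rcases List.pairwise_cons.mp hp with ⟨hle, hp'⟩
    by_cases hqa : q a = true
    · have hx : a = x := by simpa [List.find?, hqa] using h
      subst hx
      rcases List.mem_cons.mp hy with rfl | hy'
      · exact le_refl _
      · exact hle y hy'
    · have h' : t.find? q = some x := by simpa [List.find?, hqa] using h
      rcases List.mem_cons.mp hy with rfl | hy'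
      · exact absurd hqy hqa
      · exact ih hp' h' y hy' hqy

lemma pvFind?_of_min {l : List Int} {q : Int → Bool} (hp : l.Pairwise (· ≤ ·)) {x : Int}
    (hmem : x ∈ l) (hqx : q x = true) (hmin : ∀ y ∈ l, q y = true → x ≤ y) :
    l.find? q = some x := by
  induction l with
  | nil => simp at hmem
  | cons a t ih =>
    rcases List.pairwise_cons.mp hp with ⟨hle, hp'⟩
    by_cases hqa : q a = true
    · have hax : x = a := by
        rcases List.mem_cons.mp hmem with h' | h'
        · exact h'
        · exact le_antisymm (hmin a (by simp) hqa) (hle x h')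
      simp [List.find?, hqa, hax]
    · have hxt : x ∈ t := by
        rcases List.mem_cons.mp hmem with h' | h'
        · exact absurd (h' ▸ hqx) hqa
        · exact h'
      have hres := ih hp' hxt (fun y hy => hmin y (by simp [hy]))
      simpa [List.find?, hqa] using hres

-- two (≤)-sorted lists with the same members have the same find?
lemma pvFind?_eq_of_mem_iff {l₁ l₂ : List Int} {q : Int → Bool}
    (h1 : l₁.Pairwise (· ≤ ·)) (h2 : l₂.Pairwise (· ≤ ·))
    (hmm : ∀ x, x ∈ l₁ ↔ x ∈ l₂) : l₁.find? q = l₂.find? q := by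
  cases h : l₁.find? q with
  | none =>
    have hn := List.find?_eq_none.mp h
    exact (List.find?_eq_none.mpr (fun x hx => hn x ((hmm x).mpr hx))).symm
  | some x =>
    have hqx : q x = true := List.find?_some h
    have hxm : x ∈ l₁ := List.mem_of_find?_eq_some h
    have hmin := pvFind?_min h1 h
    exact (pvFind?_of_min h2 ((hmm x).mp hxm) hqx
      (fun y hy hqy => hmin y ((hmm y).mpr hy) hqy)).symm

lemma pvFind?_congr {l : List Int} {p q : Int → Bool} (h : ∀ x ∈ l, p x = q x) :
    l.find? p = l.find? q := by
  induction l with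
  | nil => rfl
  | cons a t ih =>
    have ha := h a (by simp)
    by_cases hq : q a = true
    · rw [List.find?_cons_of_pos (ha.trans hq), List.find?_cons_of_pos hq]
    · rw [List.find?_cons_of_neg (by rw [ha]; exact hq), List.find?_cons_of_neg hq]
      exact ih (fun x hx => h x (by simp [hx]))

-- A's length guard is redundant: with fewer than `count` free indices no candidate passes
lemma pvGuard (free : List Int) (count alignment : Int)
    (h : (free.length : Int) < count) :
    free.find? (pvOk free count alignment) = none := by
  cases hf : free.find? (pvOk free count alignment) with
  | none => rfl
  | some s =>
    exfalso
    have hq : pvOk free count alignment s = true := List.find?_some hf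
    have hcons : pvA_consec free s count = true := by
      simp only [pvOk, Bool.and_eq_true] at hq; exact hq.2
    have hall : ∀ i ∈ PySem.List.pyRange 0 count 1, free.contains (s + i) = true := by
      simpa [pvA_consec, List.all_eq_true] using hcons
    set m : List Int := (PySem.List.pyRange 0 count 1).map (fun i => s + i) with hm
    have hnd : m.Nodup :=
      (PySem.List.nodup_pyRange_one 0 count).map (fun a b hab => by omega)
    have hsub : ∀ x ∈ m, x ∈ free := by
      intro x hx
      rcases List.mem_map.mp hx with ⟨i, hi, rfl⟩
      have := hall i hi
      rwa [List.contains_iff_mem] at this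
    have hlen : m.length = (count - 0).toNat := by
      simp [hm, PySem.List.length_pyRange_one]
    have := pvNodup_subset_length hnd hsub
    omega

-- the inner while loop consumes exactly the integer range [a, b]; what is left starts ≥ b+2
lemma pvB_extendRun_spec : ∀ (l : List Int) (a : Int), (a :: l).Pairwise (· < ·) →
    a ≤ (pvB_extendRun a l).1 ∧
    a :: l = PySem.List.pyRange a ((pvB_extendRun a l).1 + 1) 1 ++ (pvB_extendRun a l).2 ∧
    ∀ y ∈ (pvB_extendRun a l).2, (pvB_extendRun a l).1 + 2 ≤ y := by
  intro l
  induction l with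
  | nil =>
    intro a _
    refine ⟨le_refl a, ?_, by simp [pvB_extendRun]⟩
    simp [pvB_extendRun, PySem.List.pyRange_one_singleton]
  | cons x r ih =>
    intro a hp
    rcases List.pairwise_cons.mp hp with ⟨hlt, hp'⟩
    by_cases hx : x = a + 1
    · subst hx
      have h := ih (a + 1) hp'
      have hred : pvB_extendRun a ((a + 1) :: r) = pvB_extendRun (a + 1) r := by
        simp [pvB_extendRun]
      rw [hred]
      refine ⟨by have := h.1; omega, ?_, h.2.2⟩
      have hcons : PySem.List.pyRange a ((pvB_extendRun (a + 1) r).1 + 1) 1 =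
          a :: PySem.List.pyRange (a + 1) ((pvB_extendRun (a + 1) r).1 + 1) 1 :=
        PySem.List.pyRange_one_cons (by have := h.1; omega)
      rw [hcons]
      simpa using h.2.1
    · have hred : pvB_extendRun a (x :: r) = (a, x :: r) := by
        simp [pvB_extendRun, hx]
      rw [hred]
      refine ⟨le_refl a, ?_, ?_⟩
      · simp [PySem.List.pyRange_one_singleton]
      · intro y hy
        rcases List.mem_cons.mp hy with rfl | hy'
        · have := hlt y (by simp)
          omega
        · have h1 := hlt x (by simp)
          rcases List.pairwise_cons.mp hp' with ⟨hlt', _⟩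
          have := hlt' y hy'
          omega

lemma pvAligned_iff (alignment s : Int) :
    pvAligned alignment s = true ↔ (alignment ≤ 1 ∨ PySem.Int.mod s alignment = 0) := by
  constructor
  · intro h
    by_cases h1 : (1:Int) < alignment
    · refine Or.inr ?_
      by_contra h2
      have hfalse : pvAligned alignment s = false := by
        simp [pvAligned, h1, h2]
      rw [hfalse] at h
      exact Bool.false_ne_true h
    · exact Or.inl (by omega)
  · intro h
    by_cases h1 : (1:Int) < alignment
    · rcases h with h | h
      · omega
      · simp [pvAligned, h]
    · simp [pvAligned, h1]

-- ceiling-candidate facts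
lemma pvB_cand_of_aligned {alignment a : Int} (h : pvAligned alignment a = true) :
    pvB_cand alignment a = a := by
  by_cases h2 : alignment ≤ 1
  · simp [pvB_cand, h2]
  · have hpos : (0:Int) < alignment := by omega
    have h1 : PySem.Int.mod a alignment = 0 := by
      rcases (pvAligned_iff alignment a).mp h with h1 | h1
      · omega
      · exact h1
    rcases (PySem.Int.mod_eq_zero_iff_dvd a alignment).mp h1 with ⟨k, hk⟩
    have hq : -(PySem.Int.floordiv (-a) alignment) = k := by
      rw [PySem.Int.neg_floordiv_neg_eq_iff_of_pos hpos]
      constructor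
      · nlinarith
      · nlinarith
    simp only [pvB_cand, if_neg h2]
    rw [hq, hk]
    ring

lemma pvB_cand_bounds {alignment a : Int} (h : 1 < alignment) :
    a ≤ pvB_cand alignment a ∧ PySem.Int.mod (pvB_cand alignment a) alignment = 0 := by
  have hpos : (0:Int) < alignment := by omega
  have hq : ((-(PySem.Int.floordiv (-a) alignment)) - 1) * alignment < a ∧
      a ≤ (-(PySem.Int.floordiv (-a) alignment)) * alignment :=
    (PySem.Int.neg_floordiv_neg_eq_iff_of_pos hpos).mp rfl
  constructor
  · simp only [pvB_cand, if_neg (show ¬ alignment ≤ 1 by omega)]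
    exact hq.2
  · simp only [pvB_cand, if_neg (show ¬ alignment ≤ 1 by omega)]
    exact (PySem.Int.mod_eq_zero_iff_dvd _ _).mpr
      ⟨-(PySem.Int.floordiv (-a) alignment), by ring⟩

lemma pvB_cand_succ {alignment a : Int} (h : 1 < alignment)
    (hm : ¬ PySem.Int.mod a alignment = 0) :
    pvB_cand alignment (a + 1) = pvB_cand alignment a := by
  have hpos : (0:Int) < alignment := by omega
  set q : Int := -(PySem.Int.floordiv (-a) alignment) with hqdef
  have hq : (q - 1) * alignment < a ∧ a ≤ q * alignment :=
    (PySem.Int.neg_floordiv_neg_eq_iff_of_pos hpos).mp hqdef.symm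
  have hne : a ≠ q * alignment := by
    intro he
    exact hm (by rw [he]; exact (PySem.Int.mod_eq_zero_iff_dvd _ _).mpr ⟨q, by ring⟩)
  have hlt : a < q * alignment := lt_of_le_of_ne hq.2 hne
  have hq' : -(PySem.Int.floordiv (-(a + 1)) alignment) = q := by
    rw [PySem.Int.neg_floordiv_neg_eq_iff_of_pos hpos]
    constructor
    · linarith [hq.1]
    · linarith
  have e1 : pvB_cand alignment (a + 1) = q * alignment := by
    simp only [pvB_cand, if_neg (show ¬ alignment ≤ 1 by omega), hq']
  have e2 : pvB_cand alignment a = q * alignment := by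
    simp only [pvB_cand, if_neg (show ¬ alignment ≤ 1 by omega), ← hqdef]
  rw [e1, e2]

-- find? over one maximal run [a, b]: the closed-form candidate decides everything
lemma pvChunk_find (count alignment b : Int) :
    ∀ (n : Nat) (a : Int), b - a = n →
      (PySem.List.pyRange a (b + 1) 1).find?
          (fun s => pvAligned alignment s && decide (s + count - 1 ≤ b))
        = if pvB_cand alignment a ≤ b ∧ pvB_cand alignment a + count - 1 ≤ b
          then some (pvB_cand alignment a) else none := by
  intro n
  induction n with
  | zero =>
    intro a ha
    have hab : a = b := by omega
    subst hab
    rw [PySem.List.pyRange_one_singleton]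
    by_cases hal : pvAligned alignment a = true
    · have hc := pvB_cand_of_aligned hal
      by_cases hcnt : a + count - 1 ≤ a
      · rw [List.find?_cons_of_pos (by simp [hal, hcnt]), hc,
          if_pos ⟨le_refl a, by omega⟩]
      · rw [List.find?_cons_of_neg (by simp [hal, hcnt]), List.find?_nil, hc,
          if_neg (by omega)]
    · have h1 : (1:Int) < alignment := by
        by_contra h
        exact hal ((pvAligned_iff alignment a).mpr (Or.inl (by omega)))
      have hm : ¬ PySem.Int.mod a alignment = 0 := fun h =>
        hal ((pvAligned_iff alignment a).mpr (Or.inr h))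
      have hb := pvB_cand_bounds (a := a) h1
      have hne : pvB_cand alignment a ≠ a := fun he => hm (he ▸ hb.2)
      rw [List.find?_cons_of_neg (by simp [hal]), List.find?_nil,
        if_neg (by have := hb.1; omega)]
  | succ n ih =>
    intro a ha
    rw [PySem.List.pyRange_one_cons (by omega : a < b + 1)]
    have ih' := ih (a + 1) (by omega)
    by_cases hal : pvAligned alignment a = true
    · have hc := pvB_cand_of_aligned hal
      by_cases hcnt : a + count - 1 ≤ b
      · rw [List.find?_cons_of_pos (by simp [hal, hcnt]), hc,
          if_pos ⟨by omega, by omega⟩]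
      · rw [List.find?_cons_of_neg (by simp [hal, hcnt]), ih', hc]
        have h1 : a + 1 ≤ pvB_cand alignment (a + 1) := by
          by_cases h2 : alignment ≤ 1
          · simp [pvB_cand, h2]
          · exact (pvB_cand_bounds (by omega)).1
        rw [if_neg (by omega), if_neg (by omega)]
    · have h1 : (1:Int) < alignment := by
        by_contra h
        exact hal ((pvAligned_iff alignment a).mpr (Or.inl (by omega)))
      have hm : ¬ PySem.Int.mod a alignment = 0 := fun h =>
        hal ((pvAligned_iff alignment a).mpr (Or.inr h))
      rw [List.find?_cons_of_neg (by simp [hal]), ih', pvB_cand_succ h1 hm]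

-- on a run [a, b] with b+1 free-absent, A's consecutive check is "s + count - 1 ≤ b"
lemma pvConsec_on_run {free : List Int} {count a b s : Int}
    (hmem : ∀ v, a ≤ v → v ≤ b → v ∈ free) (hb1 : (b + 1) ∉ free)
    (h1 : a ≤ s) (h2 : s ≤ b) :
    pvA_consec free s count = decide (s + count - 1 ≤ b) := by
  by_cases hc : s + count - 1 ≤ b
  · rw [decide_eq_true hc]
    simp only [pvA_consec, List.all_eq_true]
    intro i hi
    have hi' := (PySem.List.mem_pyRange_one).mp hi
    rw [List.contains_iff_mem]
    exact hmem (s + i) (by omega) (by omega)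
  · rw [decide_eq_false hc]
    simp only [pvA_consec]
    rw [List.all_eq_false]
    refine ⟨b + 1 - s, (PySem.List.mem_pyRange_one).mpr ⟨by omega, by omega⟩, ?_⟩
    have he : s + (b + 1 - s) = b + 1 := by ring
    rw [he, List.contains_iff_mem]
    exact hb1

-- B's run loop computes find? of A's test over any sorted suffix of the index list
lemma pvB_loop_eq_find? (free : List Int) (count alignment : Int) :
    ∀ (n : Nat) (xs : List Int), xs.length ≤ n →
      xs.Pairwise (· < ·) →
      (∀ x ∈ xs, x ∈ free) →
      (∀ x, x ∈ free → x ∉ xs → ∀ y ∈ xs, x < y) →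
      pvB_loop count alignment xs = xs.find? (pvOk free count alignment) := by
  intro n
  induction n with
  | zero =>
    intro xs hlen _ _ _
    have hnil : xs = [] := List.length_eq_zero_iff.mp (by omega)
    subst hnil
    simp [pvB_loop]
  | succ n ih =>
    intro xs hlen hp hsub hlow
    cases xs with
    | nil => simp [pvB_loop]
    | cons a rest =>
      obtain ⟨hab, hsplit, hrest⟩ := pvB_extendRun_spec rest a hp
      set b : Int := (pvB_extendRun a rest).1 with hbdef
      set rest' : List Int := (pvB_extendRun a rest).2 with hrdef
      have hmemrun : ∀ v, a ≤ v → v ≤ b → v ∈ free := by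
        intro v hv1 hv2
        apply hsub
        rw [hsplit]
        exact List.mem_append_left _ ((PySem.List.mem_pyRange_one).mpr ⟨hv1, by omega⟩)
      have hb1 : (b + 1) ∉ free := by
        intro hbf
        have hnot : (b + 1) ∉ a :: rest := by
          rw [hsplit]
          intro hmem
          rcases List.mem_append.mp hmem with hmem | hmem
          · have := (PySem.List.mem_pyRange_one).mp hmem
            omega
          · have := hrest _ hmem
            omega
        have := hlow (b + 1) hbf hnot a (by simp)
        omega
      have hpw : ∀ s ∈ PySem.List.pyRange a (b + 1) 1,
          pvOk free count alignment s =
            (pvAligned alignment s && decide (s + count - 1 ≤ b)) := by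
        intro s hs
        have hs' := (PySem.List.mem_pyRange_one).mp hs
        simp only [pvOk]
        rw [pvConsec_on_run hmemrun hb1 hs'.1 (by omega)]
      have hchunk : (PySem.List.pyRange a (b + 1) 1).find? (pvOk free count alignment)
          = if pvB_cand alignment a ≤ b ∧ pvB_cand alignment a + count - 1 ≤ b
            then some (pvB_cand alignment a) else none := by
        rw [pvFind?_congr hpw]
        exact pvChunk_find count alignment b (b - a).toNat a (by omega)
      have hfind : (a :: rest).find? (pvOk free count alignment)
          = ((PySem.List.pyRange a (b + 1) 1).find? (pvOk free count alignment)).or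
              (rest'.find? (pvOk free count alignment)) := by
        conv_lhs => rw [hsplit]
        rw [List.find?_append]
      rw [hfind, hchunk]
      simp only [pvB_loop, ← hbdef, ← hrdef]
      by_cases hcond : pvB_cand alignment a ≤ b ∧ pvB_cand alignment a + count - 1 ≤ b
      · simp [hcond]
      · rw [if_neg hcond, if_neg hcond, Option.none_or]
        have hlen2 : rest'.length ≤ rest.length := by
          rw [hrdef]; exact pvB_extendRun_length a rest
        have hplen : rest'.length ≤ n := by
          simp only [List.length_cons] at hlen
          omega
        have hpa : (PySem.List.pyRange a (b + 1) 1 ++ rest').Pairwise (· < ·) :=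
          hsplit ▸ hp
        have hp' : rest'.Pairwise (· < ·) := (List.pairwise_append.mp hpa).2.1
        have hsub' : ∀ x ∈ rest', x ∈ free := by
          intro x hx
          exact hsub x (by rw [hsplit]; exact List.mem_append_right _ hx)
        have hlow' : ∀ x, x ∈ free → x ∉ rest' → ∀ y ∈ rest', x < y := by
          intro x hxf hxn y hy
          by_cases hxm : x ∈ a :: rest
          · have hxc : x ∈ PySem.List.pyRange a (b + 1) 1 := by
              rw [hsplit] at hxm
              rcases List.mem_append.mp hxm with h | h
              · exact h
              · exact absurd h hxn
            have hx := (PySem.List.mem_pyRange_one).mp hxc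
            have := hrest y hy
            omega
          · exact hlow x hxf hxm y (by rw [hsplit]; exact List.mem_append_right _ hy)
        exact ih rest' hplen hp' hsub' hlow'

-- ===== VERDICT (by name: the statement is the Claim_ definition above) =====
theorem find_aligned_free_registers_spec : Claim_equal_find_aligned_free_registers := by
  intro fgpr_set prefix_ count alignment _
  show _ = _
  unfold find_aligned_free_registers find_aligned_free_registers_alt
  have hfree : pvA_indices fgpr_set prefix_ =
      PySem.List.sorted
        ((fgpr_set.filter (fun r =>
            PySem.Str.startswith r prefix_ &&
            PySem.Str.strIsdigit (PySem.Str.slice r (some 1) none))).map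
          (fun r => (PySem.Int.ofStr? (PySem.Str.slice r (some 1) none)).getD 0))
        (fun x => x) false := rfl
  have hidxs : pvB_indices fgpr_set prefix_ =
      PySem.List.sorted
        (PySem.Set.ofList
          ((fgpr_set.filter (fun r =>
              PySem.Str.startswith r prefix_ &&
              PySem.Str.strIsdigit (PySem.Str.slice r (some 1) none))).map
            (fun r => (PySem.Int.ofStr? (PySem.Str.slice r (some 1) none)).getD 0)))
        (fun x => x) false := rfl
  set free : List Int := pvA_indices fgpr_set prefix_ with hfreedef
  set idxs : List Int := pvB_indices fgpr_set prefix_ with hidef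
  have hfreeP : free.Pairwise (· ≤ ·) := by
    have h := PySem.List.sorted_pairwise
      ((fgpr_set.filter (fun r =>
          PySem.Str.startswith r prefix_ &&
          PySem.Str.strIsdigit (PySem.Str.slice r (some 1) none))).map
        (fun r => (PySem.Int.ofStr? (PySem.Str.slice r (some 1) none)).getD 0))
      (fun x => x)
    rw [← hfree] at h
    exact h
  have hidxP : idxs.Pairwise (· < ·) := by
    have h := PySem.List.sorted_ofList_pairwise_lt
      ((fgpr_set.filter (fun r =>
          PySem.Str.startswith r prefix_ &&
          PySem.Str.strIsdigit (PySem.Str.slice r (some 1) none))).map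
        (fun r => (PySem.Int.ofStr? (PySem.Str.slice r (some 1) none)).getD 0))
    rw [← hidxs] at h
    exact h
  have hmm : ∀ x, x ∈ idxs ↔ x ∈ free := by
    intro x
    rw [hfree, hidxs, PySem.List.mem_sorted, PySem.List.mem_sorted, PySem.Set.mem_ofList]
  have hB : pvB_loop count alignment idxs = idxs.find? (pvOk free count alignment) :=
    pvB_loop_eq_find? free count alignment idxs.length idxs le_rfl hidxP
      (fun x hx => (hmm x).mp hx)
      (fun x hxf hxn => absurd ((hmm x).mpr hxf) hxn)
  have hEq : idxs.find? (pvOk free count alignment) = free.find? (pvOk free count alignment) :=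
    pvFind?_eq_of_mem_iff (hidxP.imp (fun h => le_of_lt h)) hfreeP hmm
  rw [hB, hEq]
  by_cases hg : (free.length : Int) < count
  · rw [if_pos hg, pvGuard free count alignment hg]
  · rw [if_neg hg, pvA_loop_eq_find?]
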